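-- pv_equiv track=rewrite | github.com/shohei-kojima/Filo_Paramyxo_2023 | scripts/Paramyxo_tr.py | detect_promoter_perfect_match
-- ===== SOURCE A (Python) =====
-- promoter_search_len = 40
--
-- def complement(seq):
--     return seq.translate(str.maketrans('ATGCatgc', 'TACGtacg'))[::-1]
--
-- def detect_promoter_perfect_match(seq):
--     seq1 = seq[:promoter_search_len]
--     seq2 = seq[-promoter_search_len:]
--     seq2 = complement(seq2)
--     n=0
--     for c1,c2 in zip(seq1, seq2):
--         if c1 == c2:
--             n += 1
--         else:
--             break
--     if n > 0:
--         promoter=seq1[:n]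
--     else:
--         promoter='NA'
--     return promoter,n
-- ===== SOURCE B (Python) =====
-- promoter_search_len = 40
--
-- def complement(seq):
--     return seq.translate(str.maketrans('ATGCatgc', 'TACGtacg'))[::-1]
--
-- def detect_promoter_perfect_match(seq):
--     # Binary search for the largest k such that seq1[:k] == seq2[:k]:
--     # prefix equality is monotone (downward closed) in k, so the longest
--     # matching prefix length can be found by bisection on whole-slice
--     # comparisons instead of a character-by-character scan.
--     seq1 = seq[:promoter_search_len]
--     seq2 = complement(seq[-promoter_search_len:])
--     lo, hi = 0, min(len(seq1), len(seq2))
--     while lo < hi: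
--         mid = (lo + hi + 1) // 2
--         if seq1[:mid] == seq2[:mid]:
--             lo = mid
--         else:
--             hi = mid - 1
--     return (seq1[:lo], lo) if lo > 0 else ('NA', 0)
-- ===== Notes on version B (the rewrite author's own statement) =====
-- stated objective: alternative
-- what changed: B replaces A's linear break-on-mismatch counting loop with a binary search on k for the largest k with seq1[:k] == seq2[:k] (prefix equality is monotone in k), deciding each step by one whole-slice comparison.
import Mathlib
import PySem

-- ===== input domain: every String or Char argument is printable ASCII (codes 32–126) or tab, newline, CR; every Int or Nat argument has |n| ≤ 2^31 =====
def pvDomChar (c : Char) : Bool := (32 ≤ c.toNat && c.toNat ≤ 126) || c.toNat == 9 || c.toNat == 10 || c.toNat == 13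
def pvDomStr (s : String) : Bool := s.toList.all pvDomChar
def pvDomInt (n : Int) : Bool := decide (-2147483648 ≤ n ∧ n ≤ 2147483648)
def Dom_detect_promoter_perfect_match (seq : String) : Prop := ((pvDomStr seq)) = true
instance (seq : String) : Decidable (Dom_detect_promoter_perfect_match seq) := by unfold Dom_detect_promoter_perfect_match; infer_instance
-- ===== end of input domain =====

-- B replaces A's linear break-on-mismatch counting loop with a binary search for
-- the largest k with seq1[:k] == seq2[:k] (prefix equality is monotone in k);
-- alternative algorithm, same result.

-- ===== PORT A =====

-- str.maketrans('ATGCatgc', 'TACGtacg') applied per character (exact: chars not in the table are unchanged)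
def complChar (c : Char) : Char :=
  if c = 'A' then 'T' else if c = 'T' then 'A' else if c = 'G' then 'C' else if c = 'C' then 'G'
  else if c = 'a' then 't' else if c = 't' then 'a' else if c = 'g' then 'c' else if c = 'c' then 'g'
  else c

-- complement(seq) = seq.translate(...)[::-1]  (shared helper: identical in Source A and Source B)
def complementA (s : List Char) : List Char := (s.map complChar).reverse

-- the for-loop over zip(seq1, seq2) with break, accumulator n
def countLoop : List (Char × Char) → Int → Int
  | [], n => n
  | (c1, c2) :: rest, n => if c1 = c2 then countLoop rest (n + 1) else n

def detect_promoter_perfect_match (seq : String) : String × Int :=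
  let s := seq.toList
  let seq1 := PySem.List.slice s none (some 40)
  let seq2 := complementA (PySem.List.slice s (some (-40)) none)
  let n := countLoop (seq1.zip seq2) 0
  let promoter := if n > 0 then String.ofList (PySem.List.slice seq1 none (some n)) else "NA"
  (promoter, n)

-- ===== PORT B =====

-- while lo < hi: mid = (lo+hi+1)//2; if seq1[:mid]==seq2[:mid]: lo = mid else hi = mid-1
-- (the slices seq1[:mid], seq2[:mid] with 0 ≤ mid are exactly List.take mid)
def bisect (s1 s2 : List Char) (lo hi : Nat) : Nat :=
  if h : lo < hi then
    let mid := (lo + hi + 1) / 2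
    if s1.take mid = s2.take mid then bisect s1 s2 mid hi
    else bisect s1 s2 lo (mid - 1)
  else lo
termination_by hi - lo
decreasing_by all_goals omega

def detect_promoter_perfect_match_alt (seq : String) : String × Int :=
  let s := seq.toList
  let seq1 := PySem.List.slice s none (some 40)
  let seq2 := complementA (PySem.List.slice s (some (-40)) none)
  let n := bisect seq1 seq2 0 (min seq1.length seq2.length)
  if n > 0 then (String.ofList (seq1.take n), (n : Int)) else ("NA", 0)

-- ===== PRECONDITION & SPEC =====
def Spec_detect_promoter_perfect_match (seq : String) (out : String × Int) : Prop := out = detect_promoter_perfect_match_alt seq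
instance (seq : String) (out : String × Int) : Decidable (Spec_detect_promoter_perfect_match seq out) := by unfold Spec_detect_promoter_perfect_match; infer_instance

-- ===== CLAIM (what is proved, stated in full; the proofs are below) =====
def Claim_equal_detect_promoter_perfect_match : Prop := ∀ (seq : String), Dom_detect_promoter_perfect_match seq → Spec_detect_promoter_perfect_match seq (detect_promoter_perfect_match seq)

-- ===== LEMMAS AND PROOFS =====

-- common-prefix length of two char lists (the common spec of both loops)
def cp : List Char → List Char → Nat
  | a :: t1, b :: t2 => if a = b then cp t1 t2 + 1 else 0
  | _, _ => 0

lemma cp_le_length_right : ∀ (xs ys : List Char), cp xs ys ≤ ys.length := by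
  intro xs
  induction xs with
  | nil => intro ys; cases ys <;> simp [cp]
  | cons a t ih =>
    intro ys; cases ys with
    | nil => simp [cp]
    | cons b t2 =>
      simp only [cp, List.length_cons]
      split_ifs with h
      · exact Nat.add_le_add_right (ih t2) 1
      · omega

lemma cp_le_length_left : ∀ (xs ys : List Char), cp xs ys ≤ xs.length := by
  intro xs
  induction xs with
  | nil => intro ys; simp [cp]
  | cons a t ih =>
    intro ys; cases ys with
    | nil => simp [cp]
    | cons b t2 =>
      simp only [cp, List.length_cons]
      split_ifs with h
      · exact Nat.add_le_add_right (ih t2) 1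
      · omega

-- A's loop computes the common-prefix length
lemma countLoop_eq : ∀ (xs ys : List Char) (k : Int),
    countLoop (xs.zip ys) k = k + (cp xs ys : Int) := by
  intro xs
  induction xs with
  | nil => intro ys k; cases ys <;> simp [countLoop, cp]
  | cons a t ih =>
    intro ys k
    cases ys with
    | nil => simp [countLoop, cp]
    | cons b t2 =>
      simp only [List.zip_cons_cons, countLoop, cp]
      split_ifs with h
      · rw [ih]; push_cast; ring
      · simp

-- prefix equality is monotone: take k agree iff k ≤ common-prefix length (for k within both)
lemma take_eq_iff_le_cp : ∀ (xs ys : List Char) (k : Nat),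
    k ≤ min xs.length ys.length → (xs.take k = ys.take k ↔ k ≤ cp xs ys) := by
  intro xs
  induction xs with
  | nil =>
    intro ys k hk
    simp at hk
    simp [hk]
  | cons a t ih =>
    intro ys k hk
    cases ys with
    | nil => simp at hk; simp [hk]
    | cons b t2 =>
      cases k with
      | zero => simp
      | succ m =>
        simp only [List.length_cons] at hk
        simp only [List.take_succ_cons, cp]
        have hih := ih t2 m (by omega)
        split_ifs with hab
        · subst hab
          constructor
          · intro h
            have h2 := (List.cons.injEq a _ a _).mp h |>.2
            have := hih.mp h2
            omega
          · intro h
            have h2 : List.take m t = List.take m t2 := hih.mpr (by omega)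
            rw [h2]
        · constructor
          · intro h
            exact absurd ((List.cons.injEq a _ b _).mp h).1 hab
          · intro h; omega

-- B's binary search returns the common-prefix length
lemma bisect_eq (s1 s2 : List Char) : ∀ (d lo hi : Nat), hi - lo ≤ d →
    lo ≤ cp s1 s2 → cp s1 s2 ≤ hi → hi ≤ min s1.length s2.length →
    bisect s1 s2 lo hi = cp s1 s2 := by
  intro d
  induction d with
  | zero =>
    intro lo hi hd hlo hhi _
    rw [bisect]
    have : ¬ lo < hi := by omega
    simp only [this, dite_false]
    omega
  | succ k ih =>
    intro lo hi hd hlo hhi hmin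
    rw [bisect]
    by_cases h : lo < hi
    · simp only [h, dite_true]
      set mid := (lo + hi + 1) / 2 with hmid
      have h1 : lo < mid := by omega
      have h2 : mid ≤ hi := by omega
      have hiff := take_eq_iff_le_cp s1 s2 mid (by omega)
      split_ifs with he
      · exact ih mid hi (by omega) (hiff.mp he) hhi hmin
      · have : ¬ mid ≤ cp s1 s2 := fun hle => he (hiff.mpr hle)
        exact ih lo (mid - 1) (by omega) hlo (by omega) (by omega)
    · simp only [h, dite_false]; omega

-- the two slices, concretely
lemma seq1_eq (s : List Char) : PySem.List.slice s none (some 40) = s.take 40 := by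
  have := PySem.List.slice_to_natCast (xs := s) (b := 40)
  simpa using this

lemma seq2_eq (s : List Char) :
    PySem.List.slice s (some (-40)) none = s.drop (s.length - 40) := by
  have := PySem.List.slice_from_neg_natCast (xs := s) (k := 40) (by omega)
  simpa using this

-- ===== VERDICT (by name: the statement is the Claim_ definition above) =====
theorem detect_promoter_perfect_match_spec : Claim_equal_detect_promoter_perfect_match := by
  intro seq _
  unfold Spec_detect_promoter_perfect_match detect_promoter_perfect_match detect_promoter_perfect_match_alt
  set s := seq.toList with hs
  simp only [seq1_eq, seq2_eq]
  set s1 := s.take 40 with hs1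
  set s2 := complementA (s.drop (s.length - 40)) with hs2
  rw [countLoop_eq]
  have hc1 := cp_le_length_left s1 s2
  have hc2 := cp_le_length_right s1 s2
  rw [bisect_eq s1 s2 (min s1.length s2.length) 0 (min s1.length s2.length)
      (by omega) (by omega) (by omega) (le_refl _)]
  set c := cp s1 s2 with hc
  by_cases h0 : c = 0
  · simp [h0]
  · have hpos : 0 < c := Nat.pos_of_ne_zero h0
    have hposZ : (0 : Int) < (c : Int) := by exact_mod_cast hpos
    simp only [zero_add, hposZ, if_pos, hpos]
    have hslice : PySem.List.slice s1 none (some ((c : Nat) : Int)) = s1.take c :=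
      PySem.List.slice_to_natCast s1 c
    rw [hslice]
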